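-- pv_equiv track=rewrite | github.com/fqian5/Adiabatic_Clock | clock.py | get_bandwidth
-- ===== SOURCE A (Python) =====
-- def get_bandwidth(matrix):
--     """
--     Determines the minimal bandwidth of a square matrix.
--
--     A matrix is said to be band diagonal if all entries for which |i - j| > k are zero,
--     where k is the bandwidth. This function returns the minimal bandwidth k such that every
--     nonzero element of the matrix satisfies |i - j| <= k.
--
--     Parameters:
--         matrix (list of lists): The square matrix to check.
--
--     Returns:
--         int: The minimal bandwidth k.
--
--     Raises:
--         ValueError: If the matrix is not square.
--     """
--     n = len(matrix)
--
--     # Ensure the matrix is square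
--     for row in matrix:
--         if len(row) != n:
--             raise ValueError("Matrix must be square.")
--
--     # Compute the minimal required bandwidth by checking every element.
--     required_bandwidth = 0
--     for i in range(n):
--         for j in range(n):
--             if matrix[i][j] != 0:
--                 required_bandwidth = max(required_bandwidth, abs(i - j))
--
--     # By definition, all nonzero elements are within |i - j| <= required_bandwidth.
--     # (Elements outside this band are zero, since required_bandwidth is computed as the max |i-j|
--     # for a nonzero entry.)
--
--     return required_bandwidth
-- ===== SOURCE B (Python) =====
-- def get_bandwidth(matrix):
--     n = len(matrix)
--     for row in matrix:
--         if len(row) != n: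
--             raise ValueError("Matrix must be square.")
--     bw = 0
--     for i, row in enumerate(matrix):
--         # scan from the left for the first nonzero column
--         first = None
--         for j, v in enumerate(row):
--             if v != 0:
--                 first = j
--                 break
--         if first is None:
--             continue  # all-zero row contributes nothing
--         # scan from the right for the last nonzero column
--         last = first
--         for j in range(n - 1, first, -1):
--             if row[j] != 0:
--                 last = j
--                 break
--         bw = max(bw, abs(i - first), abs(i - last))
--     return bw
-- ===== Notes on version B (the rewrite author's own statement) =====
-- stated objective: faster
-- what changed: Instead of testing every (i,j) entry, B scans each row from the left to its first nonzero and from the right to its last nonzero (break scans) and updates the running maximum only from those two extreme columns.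
import Mathlib
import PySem

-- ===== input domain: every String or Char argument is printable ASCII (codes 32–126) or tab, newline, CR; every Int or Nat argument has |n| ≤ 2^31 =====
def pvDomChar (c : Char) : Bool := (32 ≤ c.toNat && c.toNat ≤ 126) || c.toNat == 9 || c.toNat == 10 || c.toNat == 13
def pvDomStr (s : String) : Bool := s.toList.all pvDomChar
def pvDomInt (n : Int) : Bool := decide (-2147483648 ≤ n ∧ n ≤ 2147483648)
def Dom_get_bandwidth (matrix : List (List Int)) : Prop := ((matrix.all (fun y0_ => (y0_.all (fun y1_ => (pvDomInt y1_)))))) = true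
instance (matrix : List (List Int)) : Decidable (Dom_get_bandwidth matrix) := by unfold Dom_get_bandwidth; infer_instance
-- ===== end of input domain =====

-- B replaces A's full n×n element scan by a per-row two-sided break scan
-- (first nonzero column from the left, last nonzero column from the right).

-- ===== PORT A =====
def get_bandwidth (matrix : List (List Int)) : Int :=
  let n : Int := matrix.length
  (PySem.List.pyRange 0 n 1).foldl (fun acc i =>
    (PySem.List.pyRange 0 n 1).foldl (fun acc j =>
      if PySem.List.pyGetD (PySem.List.pyGetD matrix i []) j 0 ≠ 0 then
        max acc |i - j| else acc) acc) 0

-- ===== PORT B =====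
-- left-to-right scan with break: index of the first nonzero entry of the row
def bFirstNonzero : List Int → Nat → Option Nat
  | [], _ => none
  | v :: rest, j => if v ≠ 0 then some j else bFirstNonzero rest (j + 1)

-- right-to-left scan with break (Python's 'for j in range(n-1, first, -1)'):
-- last nonzero column of the row, defaulting to f when none is found right of f
def bLastNonzero (row : List Int) (f : Nat) (j : Nat) : Nat :=
  if j ≤ f then f
  else if PySem.List.pyGetD row (j : Int) 0 ≠ 0 then j
  else bLastNonzero row f (j - 1)
termination_by j
decreasing_by omega

def get_bandwidth_alt (matrix : List (List Int)) : Int :=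
  let n : Nat := matrix.length
  (PySem.List.enumerate matrix 0).foldl (fun (bw : Int) (p : Int × List Int) =>
    match bFirstNonzero p.2 0 with
    | none => bw
    | some f =>
      let last : Nat := bLastNonzero p.2 f (n - 1)
      max bw (max |p.1 - (f : Int)| |p.1 - (last : Int)|)) 0

-- ===== PRECONDITION & SPEC =====
-- Pre_ excludes non-square matrices, on which the Python A raises ValueError (B raises too).
def Pre_get_bandwidth (matrix : List (List Int)) : Prop :=
  ∀ row ∈ matrix, row.length = matrix.length
instance (matrix : List (List Int)) : Decidable (Pre_get_bandwidth matrix) := by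
  unfold Pre_get_bandwidth; infer_instance
def pvWitness_get_bandwidth : List (List Int) := [[1, 0], [0, 1]]

def Spec_get_bandwidth (matrix : List (List Int)) (out : Int) : Prop := out = get_bandwidth_alt matrix
instance (matrix : List (List Int)) (out : Int) : Decidable (Spec_get_bandwidth matrix out) := by unfold Spec_get_bandwidth; infer_instance

-- ===== CLAIM (what is proved, stated in full; the proofs are below) =====
def Claim_equal_get_bandwidth : Prop := ∀ (matrix : List (List Int)), Dom_get_bandwidth matrix → Pre_get_bandwidth matrix → Spec_get_bandwidth matrix (get_bandwidth matrix)

-- ===== LEMMAS AND PROOFS =====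

-- the accumulator step of the (rewritten) inner loop of A
def pvStep (g : Int → Int) (a : Int) (q : Int × Int) : Int :=
  if q.2 ≠ 0 then max a (g q.1) else a

theorem pvStep_ge (g : Int → Int) (a : Int) (q : Int × Int) : a ≤ pvStep g a q := by
  unfold pvStep; split
  · exact le_max_left _ _
  · exact le_rfl

theorem fold_ge_acc (g : Int → Int) : ∀ (l : List (Int × Int)) (a : Int),
    a ≤ l.foldl (pvStep g) a := by
  intro l
  induction l with
  | nil => intro a; exact le_rfl
  | cons q rest ih =>
    intro a
    exact le_trans (pvStep_ge g a q) (ih (pvStep g a q))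

theorem fold_ge_mem (g : Int → Int) : ∀ (l : List (Int × Int)) (a : Int) (q : Int × Int),
    q ∈ l → q.2 ≠ 0 → g q.1 ≤ l.foldl (pvStep g) a := by
  intro l
  induction l with
  | nil => intro a q h; exact absurd h (List.not_mem_nil)
  | cons x rest ih =>
    intro a q hmem hq
    rcases List.mem_cons.mp hmem with h | h
    · subst h
      have h1 : g q.1 ≤ pvStep g a q := by
        unfold pvStep; rw [if_pos hq]; exact le_max_right _ _
      exact le_trans h1 (fold_ge_acc g rest _)
    · exact ih _ q h hq

theorem fold_le (g : Int → Int) (b : Int) : ∀ (l : List (Int × Int)) (a : Int),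
    a ≤ b → (∀ q ∈ l, q.2 ≠ 0 → g q.1 ≤ b) → l.foldl (pvStep g) a ≤ b := by
  intro l
  induction l with
  | nil => intro a ha _; exact ha
  | cons x rest ih =>
    intro a ha hall
    apply ih
    · unfold pvStep; split
      · exact max_le ha (hall x (List.mem_cons_self) (by assumption))
      · exact ha
    · intro q hq hq2; exact hall q (List.mem_cons_of_mem _ hq) hq2

theorem fold_all_zero (g : Int → Int) : ∀ (l : List (Int × Int)) (a : Int),
    (∀ q ∈ l, q.2 = 0) → l.foldl (pvStep g) a = a := by
  intro l
  induction l with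
  | nil => intro a _; rfl
  | cons x rest ih =>
    intro a h
    have hx : pvStep g a x = a := by
      unfold pvStep
      rw [if_neg (by simpa using h x (List.mem_cons_self))]
    rw [List.foldl_cons, hx]
    exact ih a (fun q hq => h q (List.mem_cons_of_mem _ hq))

-- |i - k| is maximal at the extremes of an interval
theorem abs_between (i f k r : Int) (h1 : f ≤ k) (h2 : k ≤ r) :
    |i - k| ≤ max |i - f| |i - r| := by
  rw [le_max_iff]
  rcases abs_cases (i - k) with ⟨e1, _⟩ | ⟨e1, _⟩ <;>
  rcases abs_cases (i - f) with ⟨e2, _⟩ | ⟨e2, _⟩ <;>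
  rcases abs_cases (i - r) with ⟨e3, _⟩ | ⟨e3, _⟩ <;>
  rw [e1, e2, e3] <;> omega

-- specification of bFirstNonzero
theorem bfn_none : ∀ (l : List Int) (j : Nat), bFirstNonzero l j = none →
    ∀ v ∈ l, v = 0 := by
  intro l
  induction l with
  | nil => intro j _ v hv; exact absurd hv (List.not_mem_nil)
  | cons x rest ih =>
    intro j h v hv
    rw [bFirstNonzero] at h
    by_cases hx : x ≠ 0
    · rw [if_pos hx] at h; exact absurd h (by simp)
    · rw [if_neg hx] at h
      rcases List.mem_cons.mp hv with h' | h'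
      · subst h'; omega
      · exact ih _ h v h'

theorem bfn_some : ∀ (l : List Int) (j f : Nat), bFirstNonzero l j = some f →
    ∃ k, f = j + k ∧ k < l.length ∧ l.getD k 0 ≠ 0 ∧ ∀ m < k, l.getD m 0 = 0 := by
  intro l
  induction l with
  | nil => intro j f h; exact absurd h (by simp [bFirstNonzero])
  | cons x rest ih =>
    intro j f h
    rw [bFirstNonzero] at h
    by_cases hx : x ≠ 0
    · rw [if_pos hx] at h
      refine ⟨0, by simpa using h.symm, by simp, by simpa using hx, by omega⟩
    · rw [if_neg hx] at h
      obtain ⟨k, hk1, hk2, hk3, hk4⟩ := ih (j + 1) f h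
      refine ⟨k + 1, by omega, by simpa using hk2, by simpa using hk3, ?_⟩
      intro m hm
      cases m with
      | zero => simpa using (by omega : x = 0)
      | succ m' => simpa using hk4 m' (by omega)

-- specification of bLastNonzero
theorem bln_spec (row : List Int) (f : Nat) : ∀ (j : Nat), f ≤ j →
    (f ≤ bLastNonzero row f j ∧ bLastNonzero row f j ≤ j ∧
     (bLastNonzero row f j = f ∨ row.getD (bLastNonzero row f j) 0 ≠ 0) ∧
     ∀ m, bLastNonzero row f j < m → m ≤ j → row.getD m 0 = 0) := by
  intro j
  induction j using Nat.strong_induction_on with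
  | _ j ih =>
    intro hfj
    rw [bLastNonzero]
    by_cases h1 : j ≤ f
    · rw [if_pos h1]
      exact ⟨le_rfl, by omega, Or.inl rfl, by omega⟩
    · rw [if_neg h1]
      by_cases h2 : PySem.List.pyGetD row (j : Int) 0 ≠ 0
      · rw [if_pos h2]
        refine ⟨by omega, le_rfl, Or.inr ?_, by omega⟩
        rwa [PySem.List.pyGetD_natCast] at h2
      · rw [if_neg h2]
        obtain ⟨c1, c2, c3, c4⟩ := ih (j - 1) (by omega) (by omega)
        refine ⟨c1, by omega, c3, ?_⟩
        intro m hm1 hm2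
        by_cases hmj : m = j
        · subst hmj
          rw [PySem.List.pyGetD_natCast] at h2
          omega
        · exact c4 m hm1 (by omega)

-- the inner loop of A, over one row, equals B's two-sided break scan
theorem row_eq (i acc : Int) (row : List Int) :
    (PySem.List.pyRange 0 (row.length : Int) 1).foldl
      (fun acc j => if PySem.List.pyGetD row j 0 ≠ 0 then max acc |i - j| else acc) acc
    = match bFirstNonzero row 0 with
      | none => acc
      | some f => max acc (max |i - (f : Int)| |i - ((bLastNonzero row f (row.length - 1) : Nat) : Int)|) := by
  have hrw : (PySem.List.pyRange 0 (row.length : Int) 1).foldl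
      (fun acc j => if PySem.List.pyGetD row j 0 ≠ 0 then max acc |i - j| else acc) acc
      = (PySem.List.enumerate row 0).foldl (pvStep (fun j => |i - j|)) acc := by
    rw [PySem.List.enumerate_eq_map_pyRange row 0, List.foldl_map]
    rfl
  rw [hrw]
  cases hf : bFirstNonzero row 0 with
  | none =>
    have hz := bfn_none row 0 hf
    apply fold_all_zero
    intro q hq
    obtain ⟨k, hk, hqe⟩ := (PySem.List.mem_enumerate_iff _ _ _).mp hq
    subst hqe
    exact hz _ (List.getElem_mem hk)
  | some f =>
    obtain ⟨k, hk1, hk2, hk3, hk4⟩ := bfn_some row 0 f hf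
    have hfk : f = k := by omega
    subst hfk
    have hfl : f < row.length := hk2
    obtain ⟨c1, c2, c3, c4⟩ := bln_spec row f (row.length - 1) (by omega)
    set r := bLastNonzero row f (row.length - 1) with hr
    apply le_antisymm
    · apply fold_le
      · exact le_max_left _ _
      · intro q hq hq2
        obtain ⟨m, hm, hqe⟩ := (PySem.List.mem_enumerate_iff _ _ _).mp hq
        subst hqe
        simp only [zero_add]
        have hge : f ≤ m := by
          by_contra hlt
          have := hk4 m (by omega)
          rw [List.getD_eq_getElem _ _ (by omega)] at this
          simp only [ne_eq] at hq2
          exact hq2 this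
        have hle : m ≤ r := by
          by_contra hgt
          have := c4 m (by omega) (by omega)
          rw [List.getD_eq_getElem _ _ (by omega)] at this
          simp only [ne_eq] at hq2
          exact hq2 this
        have := abs_between i (f : Int) (m : Int) (r : Int) (by exact_mod_cast hge) (by exact_mod_cast hle)
        exact le_trans this (le_max_right acc _)
    · apply max_le
      · exact fold_ge_acc _ _ _
      · apply max_le
        · have hmem : ((f : Int), row[f]) ∈ PySem.List.enumerate row 0 := by
            rw [PySem.List.mem_enumerate_iff]
            exact ⟨f, hfl, by simp⟩
          have hnz : row[f] ≠ 0 := by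
            have := hk3
            rwa [List.getD_eq_getElem _ _ hfl] at this
          exact fold_ge_mem _ _ acc _ hmem hnz
        · have hrl : r < row.length := by omega
          have hmem : ((r : Int), row[r]) ∈ PySem.List.enumerate row 0 := by
            rw [PySem.List.mem_enumerate_iff]
            exact ⟨r, hrl, by simp⟩
          have hnz : row[r] ≠ 0 := by
            have hgd : row.getD r 0 ≠ 0 := by
              rcases c3 with h | h
              · rw [h]; exact hk3
              · exact h
            rwa [List.getD_eq_getElem _ _ hrl] at hgd
          exact fold_ge_mem _ _ acc _ hmem hnz

-- ===== VERDICT (by name: the statement is the Claim_ definition above) =====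
theorem get_bandwidth_spec : Claim_equal_get_bandwidth := by
  intro matrix _ hpre
  unfold Spec_get_bandwidth get_bandwidth get_bandwidth_alt
  dsimp only
  rw [PySem.List.enumerate_eq_map_pyRange matrix ([] : List Int), List.foldl_map]
  apply PySem.List.foldl_congr_mem
  intro acc x hx
  have hx' := PySem.List.mem_pyRange_one.mp hx
  have hmem : PySem.List.pyGetD matrix x [] ∈ matrix := by
    apply PySem.List.pyGetD_mem
    unfold PySem.Raise.InRange
    omega
  have hlen : (PySem.List.pyGetD matrix x []).length = matrix.length := hpre _ hmem
  rw [← hlen]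
  exact row_eq x acc (PySem.List.pyGetD matrix x [])
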